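-- pv_equiv track=rewrite | github.com/RosenPardo/Comision_312-2 | Ejercicios_ORDENAMIENTO/Ordenamiento_2.py | intercalar_vectores
-- ===== SOURCE A (Python) =====
-- def intercalar_vectores(lista_uno: list, lista_dos: list, orden_descendente: bool = False) -> list:
--     """
--     Recibe dos vectores de números enteros, los unifica y ordena.
--
--     Args:
--         lista_uno (list): Primer lista de números enteros a ordenar.
--         lista_dos (list): Segunda lista de números enteros a ordenar.
--         orden_descendente (bool, optional): Si es True, ordena las listas de forma descendente. Default es False.
--
--     Returns:
--         list: Un array unificando y ordenando las listas.
--     """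
--
--     lista_unificada = lista_uno + lista_dos
--
--     for i in range(len(lista_unificada)):
--         for j in range(len(lista_unificada)):
--             if orden_descendente == False:
--                 if  lista_unificada[i] < lista_unificada[j]:
--                     lista_unificada[i], lista_unificada[j] = lista_unificada[j], lista_unificada[i]
--             else:
--                 if  lista_unificada[i] > lista_unificada[j]:
--                     lista_unificada[i], lista_unificada[j] = lista_unificada[j], lista_unificada[i]
--
--     return lista_unificada
-- ===== SOURCE B (Python) =====
-- def _merge(xs, ys, le):
--     out = []
--     i = j = 0
--     while i < len(xs) and j < len(ys):
--         if le(xs[i], ys[j]):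
--             out.append(xs[i]); i += 1
--         else:
--             out.append(ys[j]); j += 1
--     out.extend(xs[i:])
--     out.extend(ys[j:])
--     return out
--
--
-- def _msort(l, le):
--     if len(l) <= 1:
--         return l[:]
--     m = len(l) // 2
--     return _merge(_msort(l[:m], le), _msort(l[m:], le), le)
--
--
-- def intercalar_vectores(lista_uno: list, lista_dos: list, orden_descendente: bool = False) -> list:
--     le = (lambda x, y: y <= x) if orden_descendente else (lambda x, y: x <= y)
--     return _msort(lista_uno + lista_dos, le)
-- ===== Notes on version B (the rewrite author's own statement) =====
-- stated objective: faster
-- what changed: Replaced the quadratic double-loop exchange sort over the concatenated list with a non-mutating top-down merge sort (split at midpoint, recurse, two-pointer merge) whose comparator flips for descending order.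
import Mathlib
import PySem

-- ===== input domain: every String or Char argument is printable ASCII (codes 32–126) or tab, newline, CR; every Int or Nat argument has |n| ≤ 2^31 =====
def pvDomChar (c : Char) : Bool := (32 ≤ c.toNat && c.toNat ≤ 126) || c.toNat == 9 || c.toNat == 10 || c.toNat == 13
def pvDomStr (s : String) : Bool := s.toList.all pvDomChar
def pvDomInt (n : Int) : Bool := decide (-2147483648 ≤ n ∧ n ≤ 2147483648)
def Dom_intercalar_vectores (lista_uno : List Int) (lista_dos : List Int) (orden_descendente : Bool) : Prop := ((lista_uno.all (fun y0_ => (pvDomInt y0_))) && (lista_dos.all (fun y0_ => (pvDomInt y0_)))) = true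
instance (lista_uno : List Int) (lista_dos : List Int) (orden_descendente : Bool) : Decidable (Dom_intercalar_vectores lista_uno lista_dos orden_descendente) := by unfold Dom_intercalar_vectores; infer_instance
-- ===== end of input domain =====

-- B replaces A's quadratic in-place double-loop exchange sort with a top-down merge sort (O(n log n)); neither side mutates its arguments in the Lean model, and A's Python mutation is confined to a local list.

-- ===== PORT A =====
-- literal port: lista[i], lista[j] = lista[j], lista[i] reads both old values first
def intercalar_vectores (lista_uno : List Int) (lista_dos : List Int) (orden_descendente : Bool) : List Int :=
  let lista_unificada := lista_uno ++ lista_dos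
  (List.range lista_unificada.length).foldl (fun a i =>
    (List.range lista_unificada.length).foldl (fun a j =>
      if orden_descendente = false then
        if a.getD i 0 < a.getD j 0 then (a.set i (a.getD j 0)).set j (a.getD i 0) else a
      else
        if a.getD i 0 > a.getD j 0 then (a.set i (a.getD j 0)).set j (a.getD i 0) else a) a) lista_unificada

-- ===== PORT B =====
-- two-pointer linear merge of Source B, as the obvious structural recursion
def pvMerge (le : Int → Int → Bool) : List Int → List Int → List Int
  | [], ys => ys
  | x :: xs, [] => x :: xs
  | x :: xs, y :: ys =>
      if le x y then x :: pvMerge le xs (y :: ys) else y :: pvMerge le (x :: xs) ys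

def pvMsort (le : Int → Int → Bool) (l : List Int) : List Int :=
  if h : l.length ≤ 1 then l
  else pvMerge le (pvMsort le (l.take (l.length / 2))) (pvMsort le (l.drop (l.length / 2)))
termination_by l.length
decreasing_by
  · simp only [List.length_take]; omega
  · simp only [List.length_drop]; omega

def intercalar_vectores_alt (lista_uno : List Int) (lista_dos : List Int) (orden_descendente : Bool) : List Int :=
  let le : Int → Int → Bool :=
    if orden_descendente then (fun x y => decide (y ≤ x)) else (fun x y => decide (x ≤ y))
  pvMsort le (lista_uno ++ lista_dos)

-- ===== PRECONDITION & SPEC =====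
def Spec_intercalar_vectores (lista_uno : List Int) (lista_dos : List Int) (orden_descendente : Bool) (out : List Int) : Prop := out = intercalar_vectores_alt lista_uno lista_dos orden_descendente
instance (lista_uno : List Int) (lista_dos : List Int) (orden_descendente : Bool) (out : List Int) : Decidable (Spec_intercalar_vectores lista_uno lista_dos orden_descendente out) := by unfold Spec_intercalar_vectores; infer_instance

-- ===== CLAIM (what is proved, stated in full; the proofs are below) =====
def Claim_equal_intercalar_vectores : Prop := ∀ (lista_uno : List Int) (lista_dos : List Int) (orden_descendente : Bool), Dom_intercalar_vectores lista_uno lista_dos orden_descendente → Spec_intercalar_vectores lista_uno lista_dos orden_descendente (intercalar_vectores lista_uno lista_dos orden_descendente)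

-- ===== LEMMAS AND PROOFS =====

-- generic model of A's inner-loop body, parametric in the (total pre)order r
def gstep (r : Int → Int → Bool) (i : Nat) (a : List Int) (j : Nat) : List Int :=
  if r (a.getD j 0) (a.getD i 0) then a else (a.set i (a.getD j 0)).set j (a.getD i 0)

-- prefix sortedness: the first k positions are r-nondecreasing
def PS (r : Int → Int → Bool) (k : Nat) (b : List Int) : Prop :=
  ∀ p q, p < q → q < k → q < b.length → r (b.getD p 0) (b.getD q 0) = true

-- invariant of A's inner loop (outer index i, j inner steps done, start state a)
def pvInv (r : Int → Int → Bool) (a : List Int) (n i j : Nat) (b : List Int) : Prop :=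
  b.Perm a ∧ b.length = n ∧ PS r i b ∧
    (∀ p, p < j → p < i → r (b.getD p 0) (b.getD i 0) = true)

theorem cons_get_set_perm (t : List Int) (k : Nat) (hk : k < t.length) (x : Int) :
    (t.getD k 0 :: t.set k x).Perm (x :: t) := by
  induction t generalizing k with
  | nil => simp at hk
  | cons y s ih =>
    cases k with
    | zero => simpa using List.Perm.swap x y s
    | succ k =>
      simp only [List.getD_cons_succ, List.set_cons_succ]
      refine ((List.Perm.swap y (s.getD k 0) (s.set k x)).trans
        ((ih k (by simpa using hk)).cons y)).trans ?_
      exact List.Perm.swap x y s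

theorem swap_perm_lt (a : List Int) (i j : Nat) (h : i < j) (hj : j < a.length) :
    ((a.set i (a.getD j 0)).set j (a.getD i 0)).Perm a := by
  induction a generalizing i j with
  | nil => simp at hj
  | cons y t ih =>
    cases i with
    | zero =>
      obtain ⟨k, rfl⟩ : ∃ k, j = k + 1 := ⟨j - 1, by omega⟩
      simp only [List.getD_cons_succ, List.getD_cons_zero, List.set_cons_zero,
        List.set_cons_succ]
      exact cons_get_set_perm t k (by simpa using hj) y
    | succ i =>
      obtain ⟨k, rfl⟩ : ∃ k, j = k + 1 := ⟨j - 1, by omega⟩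
      simp only [List.getD_cons_succ, List.set_cons_succ]
      exact (ih i k (by omega) (by simpa using hj)).cons y

theorem swap_perm (a : List Int) (i j : Nat) (hi : i < a.length) (hj : j < a.length) :
    ((a.set i (a.getD j 0)).set j (a.getD i 0)).Perm a := by
  rcases lt_trichotomy i j with h | h | h
  · exact swap_perm_lt a i j h hj
  · subst h
    rw [List.set_set, List.getD_eq_getElem _ _ hi, List.set_getElem_self]
  · rw [List.set_comm _ _ (by omega : i ≠ j)]
    exact swap_perm_lt a j i h hi

theorem getD_set_self (l : List Int) (i : Nat) (v : Int) (h : i < l.length) :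
    (l.set i v).getD i 0 = v := by
  rw [List.getD_eq_getElem _ _ (by simpa using h), List.getElem_set_self]

theorem getD_set_ne (l : List Int) (i j : Nat) (v : Int) (h : i ≠ j) :
    (l.set i v).getD j 0 = l.getD j 0 := by
  rcases Nat.lt_or_ge j l.length with hj | hj
  · rw [List.getD_eq_getElem _ _ (by simpa using hj), List.getD_eq_getElem _ _ hj,
      List.getElem_set_ne h]
  · rw [List.getD_eq_default _ _ (by simpa using hj), List.getD_eq_default _ _ hj]

theorem gstep_inv (r : Int → Int → Bool)
    (htot : ∀ x y, r x y = true ∨ r y x = true)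
    (htrans : ∀ x y z, r x y = true → r y z = true → r x z = true)
    (a : List Int) (n i j : Nat) (hi : i < n) (hj : j < n) (b : List Int)
    (h : pvInv r a n i j b) : pvInv r a n i (j + 1) (gstep r i b j) := by
  obtain ⟨hperm, hlen, hps, hlt⟩ := h
  unfold gstep
  by_cases hc : r (b.getD j 0) (b.getD i 0) = true
  · rw [if_pos hc]
    refine ⟨hperm, hlen, hps, fun p hp hp' => ?_⟩
    rcases Nat.lt_or_ge p j with h' | h'
    · exact hlt p h' hp'
    · have : p = j := by omega
      subst this; exact hc
  · rw [if_neg hc]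
    have hji : j ≠ i := by
      rintro rfl; rcases htot (b.getD j 0) (b.getD j 0) with h' | h' <;> exact hc h'
    have hrii : r (b.getD i 0) (b.getD j 0) = true := by
      rcases htot (b.getD i 0) (b.getD j 0) with h' | h'
      · exact h'
      · exact absurd h' hc
    have hbi : i < b.length := by omega
    have hbj : j < b.length := by omega
    set b' := (b.set i (b.getD j 0)).set j (b.getD i 0) with hb'
    have hlen' : b'.length = n := by simp [hb', hlen]
    have gi : b'.getD i 0 = b.getD j 0 := by
      rw [hb', getD_set_ne _ _ _ _ hji, getD_set_self _ _ _ hbi]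
    have gj : b'.getD j 0 = b.getD i 0 := by
      rw [hb', getD_set_self]
      simpa using hbj
    have go : ∀ p, p ≠ i → p ≠ j → b'.getD p 0 = b.getD p 0 := by
      intro p hpi hpj
      rw [hb', getD_set_ne _ _ _ _ (fun h => hpj h.symm), getD_set_ne _ _ _ _ (fun h => hpi h.symm)]
    refine ⟨(swap_perm b i j hbi hbj).trans hperm, hlen', ?_, ?_⟩
    · -- prefix of length i stays sorted
      intro p q hpq hqi hql
      rcases Nat.lt_or_ge j i with hcase | hcase
      · -- phase 1: position j (inside the prefix) was overwritten with old b[i]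
        rcases Nat.lt_trichotomy q j with hq | hq | hq
        · rw [go p (by omega) (by omega), go q (by omega) (by omega)]
          exact hps p q hpq hqi (by omega)
        · rw [hq, go p (by omega) (by omega), gj]
          exact hlt p (by omega) (by omega)
        · rcases Nat.lt_trichotomy p j with hp | hp | hp
          · rw [go p (by omega) (by omega), go q (by omega) (by omega)]
            exact hps p q hpq hqi (by omega)
          · rw [hp, gj, go q (by omega) (by omega)]
            exact htrans _ _ _ hrii (hps j q (by omega) hqi (by omega))
          · rw [go p (by omega) (by omega), go q (by omega) (by omega)]
            exact hps p q hpq hqi (by omega)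
      · -- phase 2: the prefix is untouched
        rw [go p (by omega) (by omega), go q (by omega) (by omega)]
        exact hps p q hpq hqi (by omega)
    · -- r b'[p] b'[i] for p < j+1, p < i
      intro p hp hp'
      rw [gi]
      rcases Nat.lt_or_ge j i with hcase | hcase
      · rcases Nat.lt_trichotomy p j with h' | h' | h'
        · rw [go p (by omega) (by omega)]
          exact hps p j h' hcase (by omega)
        · subst h'
          rw [gj]; exact hrii
        · -- p < j+1 and p > j impossible with p ≠ j
          omega
      · -- i ≤ j, and p < i, so p ∉ {i, j}
        rw [go p (by omega) (by omega)]
        exact htrans _ _ _ (hlt p (by omega) hp') hrii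

theorem foldl_gstep_inv (r : Int → Int → Bool)
    (htot : ∀ x y, r x y = true ∨ r y x = true)
    (htrans : ∀ x y z, r x y = true → r y z = true → r x z = true)
    (n i : Nat) (hi : i < n) (a : List Int) (ha : a.length = n) (hps : PS r i a) :
    ∀ m, m ≤ n → pvInv r a n i m ((List.range m).foldl (gstep r i) a) := by
  intro m
  induction m with
  | zero =>
    intro _
    exact ⟨List.Perm.refl a, ha, hps, by omega⟩
  | succ m ih =>
    intro hm
    rw [List.range_succ, List.foldl_append, List.foldl_cons, List.foldl_nil]
    exact gstep_inv r htot htrans a n i m hi (by omega) _ (ih (by omega))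

theorem gpass_result (r : Int → Int → Bool)
    (htot : ∀ x y, r x y = true ∨ r y x = true)
    (htrans : ∀ x y z, r x y = true → r y z = true → r x z = true)
    (n i : Nat) (hi : i < n) (a : List Int) (ha : a.length = n) (hps : PS r i a) :
    ((List.range n).foldl (gstep r i) a).Perm a ∧
      ((List.range n).foldl (gstep r i) a).length = n ∧
      PS r (i + 1) ((List.range n).foldl (gstep r i) a) := by
  obtain ⟨hperm, hlen, hps', hlt⟩ :=
    foldl_gstep_inv r htot htrans n i hi a ha hps n (Nat.le_refl n)
  refine ⟨hperm, hlen, fun p q hpq hqi hql => ?_⟩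
  rcases Nat.lt_or_ge q i with hq | hq
  · exact hps' p q hpq hq hql
  · have : q = i := by omega
    subst this
    exact hlt p (by omega) hpq

-- A's outer loop: after k passes the prefix of length k is sorted
theorem gsort_invariant (r : Int → Int → Bool)
    (htot : ∀ x y, r x y = true ∨ r y x = true)
    (htrans : ∀ x y z, r x y = true → r y z = true → r x z = true)
    (a : List Int) :
    ∀ k, k ≤ a.length →
      (((List.range k).foldl (fun b i => (List.range a.length).foldl (gstep r i) b) a).Perm a ∧
       ((List.range k).foldl (fun b i => (List.range a.length).foldl (gstep r i) b) a).length = a.length ∧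
       PS r k ((List.range k).foldl (fun b i => (List.range a.length).foldl (gstep r i) b) a)) := by
  intro k
  induction k with
  | zero =>
    intro _
    exact ⟨List.Perm.refl a, rfl, by intro p q _ hq _; omega⟩
  | succ k ih =>
    intro hk
    obtain ⟨hperm, hlen, hps⟩ := ih (by omega)
    rw [List.range_succ, List.foldl_append, List.foldl_cons, List.foldl_nil]
    obtain ⟨hperm', hlen', hps'⟩ :=
      gpass_result r htot htrans a.length k (by omega) _ hlen hps
    exact ⟨hperm'.trans hperm, hlen', hps'⟩

theorem gsort_sorted (r : Int → Int → Bool)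
    (htot : ∀ x y, r x y = true ∨ r y x = true)
    (htrans : ∀ x y z, r x y = true → r y z = true → r x z = true)
    (a : List Int) :
    (((List.range a.length).foldl (fun b i => (List.range a.length).foldl (gstep r i) b) a).Perm a ∧
     List.Pairwise (fun x y => r x y = true)
       ((List.range a.length).foldl (fun b i => (List.range a.length).foldl (gstep r i) b) a)) := by
  obtain ⟨hperm, hlen, hps⟩ :=
    gsort_invariant r htot htrans a a.length (Nat.le_refl _)
  refine ⟨hperm, ?_⟩
  rw [List.pairwise_iff_getElem]
  intro p q hp hq hpq
  have := hps p q hpq (by omega) hq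
  rwa [List.getD_eq_getElem _ _ hp, List.getD_eq_getElem _ _ hq] at this

-- A's port is the generic loop at the appropriate comparator
theorem portA_eq (lista_uno lista_dos : List Int) (d : Bool) :
    intercalar_vectores lista_uno lista_dos d =
      (List.range (lista_uno ++ lista_dos).length).foldl
        (fun b i => (List.range (lista_uno ++ lista_dos).length).foldl
          (gstep (if d then (fun x y => decide (y ≤ x)) else (fun x y => decide (x ≤ y))) i) b)
        (lista_uno ++ lista_dos) := by
  unfold intercalar_vectores
  have hstep : ∀ i : Nat, (fun (a : List Int) (j : Nat) =>
      if d = false then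
        if a.getD i 0 < a.getD j 0 then (a.set i (a.getD j 0)).set j (a.getD i 0) else a
      else
        if a.getD i 0 > a.getD j 0 then (a.set i (a.getD j 0)).set j (a.getD i 0) else a)
      = gstep (if d then (fun x y => decide (y ≤ x)) else (fun x y => decide (x ≤ y))) i := by
    intro i
    funext a j
    cases d <;> simp only [gstep, Bool.false_eq_true, if_false, if_true, decide_eq_true_eq,
      reduceCtorEq, gt_iff_lt] <;> split_ifs <;> first | rfl | omega
  simp only [hstep]

-- ===== merge sort (port B) lemmas =====
theorem pvMerge_perm (le : Int → Int → Bool) (xs ys : List Int) :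
    (pvMerge le xs ys).Perm (xs ++ ys) := by
  fun_induction pvMerge le xs ys with
  | case1 ys => simp
  | case2 x xs => simp
  | case3 x xs y ys h ih => exact ih.cons x
  | case4 x xs y ys h ih =>
    exact (ih.cons y).trans List.perm_middle.symm

theorem pvMerge_pairwise (le : Int → Int → Bool)
    (htot : ∀ x y, le x y = true ∨ le y x = true)
    (htrans : ∀ x y z, le x y = true → le y z = true → le x z = true)
    (xs ys : List Int)
    (hxs : List.Pairwise (fun x y => le x y = true) xs)
    (hys : List.Pairwise (fun x y => le x y = true) ys) :
    List.Pairwise (fun x y => le x y = true) (pvMerge le xs ys) := by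
  fun_induction pvMerge le xs ys with
  | case1 ys => exact hys
  | case2 x xs => exact hxs
  | case3 x xs y ys h ih =>
    rw [List.pairwise_cons] at hxs ⊢
    refine ⟨fun z hz => ?_, ih hxs.2 hys⟩
    have hz' : z ∈ xs ++ y :: ys := (pvMerge_perm le xs (y :: ys)).mem_iff.mp hz
    rcases List.mem_append.mp hz' with hz' | hz'
    · exact hxs.1 z hz'
    · rcases List.mem_cons.mp hz' with rfl | hz'
      · exact h
      · exact htrans _ _ _ h ((List.pairwise_cons.mp hys).1 z hz')
  | case4 x xs y ys h ih =>
    rw [List.pairwise_cons] at hys ⊢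
    have hyx : le y x = true := by
      rcases htot x y with h' | h'
      · exact absurd h' h
      · exact h'
    refine ⟨fun z hz => ?_, ih hxs hys.2⟩
    have hz' : z ∈ (x :: xs) ++ ys := (pvMerge_perm le (x :: xs) ys).mem_iff.mp hz
    rcases List.mem_append.mp hz' with hz' | hz'
    · rcases List.mem_cons.mp hz' with rfl | hz'
      · exact hyx
      · exact htrans _ _ _ hyx ((List.pairwise_cons.mp hxs).1 z hz')
    · exact hys.1 z hz'

theorem pvMsort_perm (le : Int → Int → Bool) (l : List Int) :
    (pvMsort le l).Perm l := by
  fun_induction pvMsort le l with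
  | case1 l h => exact List.Perm.refl l
  | case2 l h ih1 ih2 =>
    refine ((pvMerge_perm le _ _).trans ?_)
    have := (ih1.append ih2)
    simpa [List.take_append_drop] using this

theorem pvMsort_pairwise (le : Int → Int → Bool)
    (htot : ∀ x y, le x y = true ∨ le y x = true)
    (htrans : ∀ x y z, le x y = true → le y z = true → le x z = true)
    (l : List Int) :
    List.Pairwise (fun x y => le x y = true) (pvMsort le l) := by
  fun_induction pvMsort le l with
  | case1 l h =>
    match l, h with
    | [], _ => exact List.Pairwise.nil
    | [x], _ => simp
  | case2 l h ih1 ih2 => exact pvMerge_pairwise le htot htrans _ _ ih1 ih2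

-- ===== VERDICT =====
theorem intercalar_vectores_spec : Claim_equal_intercalar_vectores := by
  intro lista_uno lista_dos d _
  unfold Spec_intercalar_vectores intercalar_vectores_alt
  set le : Int → Int → Bool :=
    (if d then (fun x y => decide (y ≤ x)) else (fun x y => decide (x ≤ y))) with hle
  have htot : ∀ x y, le x y = true ∨ le y x = true := by
    intro x y; cases d <;> simp [hle] <;> omega
  have htrans : ∀ x y z, le x y = true → le y z = true → le x z = true := by
    intro x y z; cases d <;> simp [hle] <;> omega
  have hanti : ∀ x y, le x y = true → le y x = true → x = y := by
    intro x y; cases d <;> simp [hle] <;> omega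
  obtain ⟨hpermA, hsortA⟩ := gsort_sorted le htot htrans (lista_uno ++ lista_dos)
  rw [portA_eq]
  exact List.Perm.eq_of_pairwise
    (fun a b _ _ h1 h2 => hanti a b h1 h2) hsortA
    (pvMsort_pairwise le htot htrans _)
    (hpermA.trans (pvMsort_perm le _).symm)
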